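-- pv_equiv track=rewrite | github.com/Admire2/akandes-language | akandes_lsp/bump_version_and_release.py | detect_bump_type
-- ===== SOURCE A (Python) =====
-- def detect_bump_type(commits):
--     for msg in commits:
--         if 'BREAKING CHANGE' in msg or msg.lower().startswith('major:'):
--             return 'major'
--     for msg in commits:
--         if 'feat' in msg or msg.lower().startswith('minor:'):
--             return 'minor'
--     return 'patch'
-- ===== SOURCE B (Python) =====
-- def detect_bump_type(commits):
--     saw_minor = False
--     for msg in commits:
--         if 'BREAKING CHANGE' in msg or msg.lower().startswith('major:'):
--             return 'major'
--         if 'feat' in msg or msg.lower().startswith('minor:'):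
--             saw_minor = True
--     return 'minor' if saw_minor else 'patch'
-- ===== Notes on version B (the rewrite author's own statement) =====
-- stated objective: alternative
-- what changed: Two sequential scans (first for major, then for minor) are merged into one pass that returns 'major' immediately and carries a saw_minor flag to the end.
import Mathlib
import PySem

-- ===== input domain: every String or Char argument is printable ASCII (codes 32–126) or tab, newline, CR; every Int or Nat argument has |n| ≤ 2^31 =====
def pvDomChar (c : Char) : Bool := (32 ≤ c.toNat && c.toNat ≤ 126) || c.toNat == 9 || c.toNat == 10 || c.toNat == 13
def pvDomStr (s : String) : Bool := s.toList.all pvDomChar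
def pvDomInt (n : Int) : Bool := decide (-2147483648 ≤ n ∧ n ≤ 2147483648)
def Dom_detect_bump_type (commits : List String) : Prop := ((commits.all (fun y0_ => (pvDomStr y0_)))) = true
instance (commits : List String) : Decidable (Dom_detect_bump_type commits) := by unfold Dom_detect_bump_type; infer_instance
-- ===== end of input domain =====

-- B merges A's two sequential scans into one pass carrying a saw_minor flag; same result, alternative decomposition.


-- ===== PORT A =====
-- 'BREAKING CHANGE' in msg or msg.lower().startswith('major:')
def pvIsMajor (msg : String) : Bool :=
  PySem.Str.isIn "BREAKING CHANGE" msg || PySem.Str.startswith (PySem.Str.lower msg) "major:"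

-- 'feat' in msg or msg.lower().startswith('minor:')
def pvIsMinor (msg : String) : Bool :=
  PySem.Str.isIn "feat" msg || PySem.Str.startswith (PySem.Str.lower msg) "minor:"

-- first for-loop of A: early return 'major' ⇔ some message matches
def pvScanMajor : List String → Bool
  | [] => false
  | msg :: rest => if pvIsMajor msg then true else pvScanMajor rest

-- second for-loop of A
def pvScanMinor : List String → Bool
  | [] => false
  | msg :: rest => if pvIsMinor msg then true else pvScanMinor rest

def detect_bump_type (commits : List String) : String :=
  if pvScanMajor commits then "major"
  else if pvScanMinor commits then "minor"
  else "patch"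

-- ===== PORT B =====
-- single pass with the saw_minor accumulator
def pvBGo : List String → Bool → String
  | [], sawMinor => if sawMinor then "minor" else "patch"
  | msg :: rest, sawMinor =>
    if pvIsMajor msg then "major"
    else pvBGo rest (sawMinor || pvIsMinor msg)

def detect_bump_type_alt (commits : List String) : String :=
  pvBGo commits false

-- ===== PRECONDITION & SPEC =====
def Spec_detect_bump_type (commits : List String) (out : String) : Prop := out = detect_bump_type_alt commits
instance (commits : List String) (out : String) : Decidable (Spec_detect_bump_type commits out) := by unfold Spec_detect_bump_type; infer_instance

-- ===== CLAIM (what is proved, stated in full; the proofs are below) =====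
def Claim_equal_detect_bump_type : Prop := ∀ (commits : List String), Dom_detect_bump_type commits → Spec_detect_bump_type commits (detect_bump_type commits)

-- ===== LEMMAS AND PROOFS =====
-- loop invariant: the one-pass fold equals A's two scans with the flag folded in
theorem pvBGo_eq (cs : List String) (saw : Bool) :
    pvBGo cs saw =
      (if pvScanMajor cs then "major"
       else if saw || pvScanMinor cs then "minor" else "patch") := by
  induction cs generalizing saw with
  | nil => simp [pvBGo, pvScanMajor, pvScanMinor]
  | cons m rest ih =>
    simp only [pvBGo, pvScanMajor, pvScanMinor]
    by_cases hM : pvIsMajor m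
    · simp [hM]
    · simp only [if_neg hM, ih]
      by_cases hm : pvIsMinor m <;> simp [hm]

-- ===== VERDICT (by name: the statement is the Claim_ definition above) =====
theorem detect_bump_type_spec : Claim_equal_detect_bump_type := by
  intro commits _
  unfold Spec_detect_bump_type detect_bump_type detect_bump_type_alt
  rw [pvBGo_eq]
  simp only [Bool.false_or]
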